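-- pv_equiv track=rewrite | github.com/hontono-rookie-web-design/hontono-rookie-web | 2026spring/backend/lib/forms_client.py | build_question_headers
-- ===== SOURCE A (Python) =====
-- from collections import Counter
--
-- def build_question_headers(questions: list[dict[str, str]]) -> list[str]:
--     """
--     回答整形で利用するユニークな設問ヘッダーを作成する。
--     同名設問がある場合は question_id を末尾に付与する。
--     """
--     titles = [q.get("title", "") for q in questions]
--     duplicate_titles = {title for title, count in Counter(titles).items() if title and count > 1}
--
--     headers: list[str] = []
--     for question in questions:
--         title = question.get("title", "")
--         question_id = question.get("question_id", "")
--
--         if title in duplicate_titles: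
--             headers.append(f"{title} ({question_id})")
--         else:
--             headers.append(title or question_id)
--
--     return headers
-- ===== SOURCE B (Python) =====
-- def build_question_headers(questions: list[dict[str, str]]) -> list[str]:
--     """Single forward pass consuming the list head-by-head: a title is
--     duplicated iff it was already seen in the processed prefix or occurs
--     again in the unprocessed tail.  No counting phase, no precomputed
--     duplicate-title set."""
--     headers: list[str] = []
--     seen: set[str] = set()
--     rest = list(questions)
--     while rest:
--         q, rest = rest[0], rest[1:]
--         title = q.get("title", "")
--         qid = q.get("question_id", "")
--         if title and (title in seen or any(t.get("title", "") == title for t in rest)):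
--             headers.append(f"{title} ({qid})")
--         else:
--             headers.append(title or qid)
--         seen.add(title)
--     return headers
-- ===== Notes on version B (the rewrite author's own statement) =====
-- stated objective: alternative
-- what changed: Replaced A's two-phase Counter/duplicate-set precomputation with a single forward pass that consumes the list head-by-head, maintaining a seen-set of processed titles and deciding duplication as 'title already seen in the prefix or occurring in the unprocessed tail'.
import Mathlib
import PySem

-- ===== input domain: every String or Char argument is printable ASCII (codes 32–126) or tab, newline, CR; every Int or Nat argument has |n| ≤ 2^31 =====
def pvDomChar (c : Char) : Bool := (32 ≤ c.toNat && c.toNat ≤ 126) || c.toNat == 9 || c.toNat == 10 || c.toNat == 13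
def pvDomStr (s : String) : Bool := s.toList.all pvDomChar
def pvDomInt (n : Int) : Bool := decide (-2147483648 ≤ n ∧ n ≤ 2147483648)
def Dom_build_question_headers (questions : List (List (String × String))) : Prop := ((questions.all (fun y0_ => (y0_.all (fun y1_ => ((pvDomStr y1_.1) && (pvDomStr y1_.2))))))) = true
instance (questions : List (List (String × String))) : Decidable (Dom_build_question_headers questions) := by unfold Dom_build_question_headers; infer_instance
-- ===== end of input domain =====

-- B replaces A's Counter/duplicate-set precomputation with one forward pass consuming the list
-- head-by-head, deciding duplication via a seen-set of the prefix plus a scan of the remaining tail.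

-- ===== PORT A =====
def build_question_headers (questions : List (List (String × String))) : List String :=
  let titles := questions.map (fun q => PySem.Dict.getD (PySem.Dict.mk q) "title" "")
  let duplicate_titles : PySem.Set String :=
    PySem.Set.ofList
      ((((PySem.Dict.counter titles).items).filter
          (fun p => (p.1 != "") && decide (1 < p.2))).map (·.1))
  questions.foldl (fun headers question =>
    let title := PySem.Dict.getD (PySem.Dict.mk question) "title" ""
    let question_id := PySem.Dict.getD (PySem.Dict.mk question) "question_id" ""
    if duplicate_titles.contains title then
      headers ++ [title ++ " (" ++ question_id ++ ")"]
    else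
      headers ++ [if title != "" then title else question_id]) []

-- ===== PORT B =====
-- the while loop of Source B: consume `rest` head-by-head, carrying `headers` and the seen-set
def buildGoB (headers : List String) (seen : PySem.Set String)
    (rest : List (List (String × String))) : List String :=
  match rest with
  | [] => headers
  | q :: rest =>
    let title := PySem.Dict.getD (PySem.Dict.mk q) "title" ""
    let qid := PySem.Dict.getD (PySem.Dict.mk q) "question_id" ""
    let h := if (title != "") &&
        (seen.contains title ||
          rest.any (fun t => PySem.Dict.getD (PySem.Dict.mk t) "title" "" == title)) then
        title ++ " (" ++ qid ++ ")"
      else if title != "" then title else qid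
    buildGoB (headers ++ [h]) (seen.add title) rest

def build_question_headers_alt (questions : List (List (String × String))) : List String :=
  buildGoB [] PySem.Set.empty questions

-- ===== PRECONDITION & SPEC =====
def Spec_build_question_headers (questions : List (List (String × String))) (out : List String) : Prop := out = build_question_headers_alt questions
instance (questions : List (List (String × String))) (out : List String) : Decidable (Spec_build_question_headers questions out) := by unfold Spec_build_question_headers; infer_instance

-- ===== CLAIM (what is proved, stated in full; the proofs are below) =====
def Claim_equal_build_question_headers : Prop := ∀ (questions : List (List (String × String))), Dom_build_question_headers questions → Spec_build_question_headers questions (build_question_headers questions)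

-- ===== LEMMAS AND PROOFS =====

-- canonical per-question header, phrased by the global multiplicity of the title
def pvHdr (titles : List String) (q : List (String × String)) : String :=
  let title := PySem.Dict.getD (PySem.Dict.mk q) "title" ""
  let qid := PySem.Dict.getD (PySem.Dict.mk q) "question_id" ""
  if (title != "") && decide (1 < titles.count title) then
    title ++ " (" ++ qid ++ ")"
  else if title != "" then title else qid

-- membership in A's precomputed duplicate-title set coincides with the multiplicity test
lemma mem_dup_set (titles : List String) (t : String) :
    (PySem.Set.ofList
      ((((PySem.Dict.counter titles).items).filter
          (fun p => (p.1 != "") && decide (1 < p.2))).map (·.1))).contains t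
      = ((t != "") && decide (1 < titles.count t)) := by
  rw [Bool.eq_iff_iff, PySem.Set.contains_iff]
  simp only [PySem.Dict.items_counter, List.mem_map, List.mem_filter,
    PySem.Set.mem_ofList, Bool.and_eq_true, bne_iff_ne, decide_eq_true_eq]
  constructor
  · rintro ⟨a, ⟨⟨k, hk, rfl⟩, hne, hcnt⟩, rfl⟩
    exact ⟨hne, by simp at hcnt; exact_mod_cast hcnt⟩
  · rintro ⟨hne, hcnt⟩
    exact ⟨(t, (titles.count t : Int)), ⟨⟨t, List.count_pos_iff.mp (by omega), rfl⟩,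
      hne, by simp; exact_mod_cast hcnt⟩, rfl⟩

-- A computes the canonical map
lemma a_eq_canon (questions : List (List (String × String))) :
    build_question_headers questions
      = questions.map (pvHdr (questions.map (fun q => PySem.Dict.getD (PySem.Dict.mk q) "title" ""))) := by
  unfold build_question_headers
  rw [PySem.List.foldl_congr_mem questions _
      (fun headers q => headers ++
        [pvHdr (questions.map (fun q => PySem.Dict.getD (PySem.Dict.mk q) "title" "")) q]) []
      (fun headers q _ => by
        simp only [mem_dup_set, pvHdr]; split_ifs <;> rfl)]
  rw [PySem.List.foldl_append_singleton_eq_map]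
  simp

-- B's loop invariant: with the seen-set equal to the set of prefix titles, the loop emits the
-- canonical headers for the whole list (prefix titles ++ tail titles)
lemma goB_eq_canon (rest : List (List (String × String))) :
    ∀ (preT : List String) (headers : List String),
    buildGoB headers (PySem.Set.ofList preT) rest
      = headers ++ rest.map (pvHdr (preT ++ rest.map (fun q => PySem.Dict.getD (PySem.Dict.mk q) "title" ""))) := by
  induction rest with
  | nil => intro preT headers; simp [buildGoB]
  | cons q tl ih =>
    intro preT headers
    have hset : (PySem.Set.ofList preT).add (PySem.Dict.getD (PySem.Dict.mk q) "title" "")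
        = PySem.Set.ofList (preT ++ [PySem.Dict.getD (PySem.Dict.mk q) "title" ""]) := by
      simp [PySem.Set.ofList_eq_foldl, List.foldl_append]
    have hcond :
        ((PySem.Dict.getD (PySem.Dict.mk q) "title" "" != "") &&
          ((PySem.Set.ofList preT).contains (PySem.Dict.getD (PySem.Dict.mk q) "title" "") ||
            tl.any (fun t => PySem.Dict.getD (PySem.Dict.mk t) "title" ""
              == PySem.Dict.getD (PySem.Dict.mk q) "title" "")))
        = ((PySem.Dict.getD (PySem.Dict.mk q) "title" "" != "") &&
          decide (1 < ((preT ++ (q :: tl).map (fun q => PySem.Dict.getD (PySem.Dict.mk q) "title" "")).count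
            (PySem.Dict.getD (PySem.Dict.mk q) "title" "")))) := by
      rw [Bool.eq_iff_iff]
      simp [PySem.Set.mem_ofList, List.count_append, List.count_cons_self]
      intro _
      constructor
      · rintro (h | ⟨x, hx, hxe⟩)
        · have := List.count_pos_iff.mpr h; omega
        · have hm : PySem.Dict.getD (PySem.Dict.mk q) "title" ""
              ∈ tl.map (fun q => PySem.Dict.getD (PySem.Dict.mk q) "title" "") :=
            List.mem_map.mpr ⟨x, hx, hxe⟩
          have := List.count_pos_iff.mpr hm; omega
      · intro hcnt
        by_cases hp : PySem.Dict.getD (PySem.Dict.mk q) "title" "" ∈ preT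
        · exact Or.inl hp
        · have h0 : preT.count (PySem.Dict.getD (PySem.Dict.mk q) "title" "") = 0 :=
            List.count_eq_zero.mpr hp
          have hm : PySem.Dict.getD (PySem.Dict.mk q) "title" ""
              ∈ tl.map (fun q => PySem.Dict.getD (PySem.Dict.mk q) "title" "") :=
            List.count_pos_iff.mp (by omega)
          obtain ⟨x, hx, hxe⟩ := List.mem_map.mp hm
          exact Or.inr ⟨x, hx, hxe⟩
    show buildGoB _ _ _ = _
    rw [buildGoB]
    simp only [hcond, hset]
    rw [ih]
    simp only [List.map_cons, List.append_assoc, List.singleton_append, pvHdr]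
    rfl

-- ===== VERDICT (by name: the statement is the Claim_ definition above) =====
theorem build_question_headers_spec : Claim_equal_build_question_headers := by
  intro questions _
  show build_question_headers questions = build_question_headers_alt questions
  rw [a_eq_canon]
  unfold build_question_headers_alt
  have := goB_eq_canon questions [] []
  simpa [PySem.Set.empty] using this.symm
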